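-- pv_equiv track=rewrite | github.com/pratapbhanu022-wq/Probloems_Solved | programiz/medium/spongecase-hh.py | to_spongecase
-- ===== SOURCE A (Python) =====
-- def to_spongecase(text):
--     s=""
--     for i,ch in enumerate(text):
--         if i%2==0:
--             s+=ch.lower()
--         else:
--             s+=ch.upper()
--     return s
-- ===== SOURCE B (Python) =====
-- def to_spongecase(text):
--     res = list(text)
--     res[0::2] = [c.lower() for c in text[0::2]]
--     res[1::2] = [c.upper() for c in text[1::2]]
--     return "".join(res)
-- ===== Notes on version B (the rewrite author's own statement) =====
-- stated objective: alternative
-- what changed: Replaces the single interleaved parity-branch loop with two strided slice passes: lowercase the even-index slice, uppercase the odd-index slice, assign both back and join.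
import Mathlib
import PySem

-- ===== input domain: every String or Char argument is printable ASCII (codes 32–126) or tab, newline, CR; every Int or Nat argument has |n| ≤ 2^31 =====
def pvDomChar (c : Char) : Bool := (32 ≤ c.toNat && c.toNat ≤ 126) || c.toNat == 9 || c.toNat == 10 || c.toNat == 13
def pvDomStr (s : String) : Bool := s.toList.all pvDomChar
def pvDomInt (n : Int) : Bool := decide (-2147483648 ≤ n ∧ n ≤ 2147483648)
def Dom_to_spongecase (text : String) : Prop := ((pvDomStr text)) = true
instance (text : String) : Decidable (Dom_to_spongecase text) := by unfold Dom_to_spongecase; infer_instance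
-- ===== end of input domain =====

-- B replaces A's single interleaved parity-branch loop by two strided slice passes
-- (lowercase the even-index slice, uppercase the odd-index slice, interleave back); alternative decomposition, not faster.

-- ===== PORT A =====
-- literal port of A: fold over enumerate(text), branch on i % 2, append the recased character
def to_spongecase (text : String) : String :=
  (PySem.List.enumerate text.toList 0).foldl
    (fun s p =>
      if PySem.Int.mod p.1 2 == 0 then s.push (PySem.Chars.lowerChar p.2)
      else s.push (PySem.Chars.upperChar p.2)) ""

-- ===== PORT B =====
-- pvStride2 l = l[0::2] (every second element starting at index 0); hand-ported, exact
def pvStride2 : List Char → List Char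
  | [] => []
  | [c] => [c]
  | c :: _ :: rest => c :: pvStride2 rest

-- writing the two recased slices back into positions 0::2 and 1::2 = interleaving them
def pvInterleave : List Char → List Char → List Char
  | [], ys => ys
  | x :: xs, ys => x :: pvInterleave ys xs
termination_by xs ys => xs.length + ys.length
decreasing_by simp; omega

def to_spongecase_alt (text : String) : String :=
  let cs := text.toList
  String.ofList (pvInterleave ((pvStride2 cs).map PySem.Chars.lowerChar)
                          ((pvStride2 (cs.drop 1)).map PySem.Chars.upperChar))

-- ===== PRECONDITION & SPEC =====
def Spec_to_spongecase (text : String) (out : String) : Prop := out = to_spongecase_alt text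
instance (text : String) (out : String) : Decidable (Spec_to_spongecase text out) := by unfold Spec_to_spongecase; infer_instance

-- ===== CLAIM (what is proved, stated in full; the proofs are below) =====
def Claim_equal_to_spongecase : Prop := ∀ (text : String), Dom_to_spongecase text → Spec_to_spongecase text (to_spongecase text)

-- ===== LEMMAS AND PROOFS =====

-- common normal form: spongecase two characters at a time
def pvSponge : List Char → List Char
  | [] => []
  | [c] => [PySem.Chars.lowerChar c]
  | c :: d :: rest => PySem.Chars.lowerChar c :: PySem.Chars.upperChar d :: pvSponge rest

lemma pvStride2_cons (d : Char) (rest : List Char) :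
    pvStride2 (d :: rest) = d :: pvStride2 (rest.drop 1) := by
  cases rest <;> simp [pvStride2]

lemma pvB_eq_sponge (l : List Char) :
    pvInterleave ((pvStride2 l).map PySem.Chars.lowerChar)
                 ((pvStride2 (l.drop 1)).map PySem.Chars.upperChar) = pvSponge l := by
  induction l using pvSponge.induct with
  | case1 => simp [pvStride2, pvInterleave, pvSponge]
  | case2 c => simp [pvStride2, pvInterleave, pvSponge]
  | case3 c d rest ih =>
      simp only [pvStride2, List.drop_succ_cons, List.drop_zero, List.map_cons, pvSponge]
      rw [pvInterleave.eq_2, pvStride2_cons, List.map_cons, pvInterleave.eq_2]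
      simpa using ih

lemma pvA_foldl_toList (L : List (Int × Char)) (acc : String) :
    ((L.foldl (fun s p =>
      if PySem.Int.mod p.1 2 == 0 then s.push (PySem.Chars.lowerChar p.2)
      else s.push (PySem.Chars.upperChar p.2)) acc)).toList
    = acc.toList ++ L.map (fun p =>
        if PySem.Int.mod p.1 2 == 0 then PySem.Chars.lowerChar p.2
        else PySem.Chars.upperChar p.2) := by
  induction L generalizing acc with
  | nil => simp
  | cons p L ih =>
      simp only [List.foldl_cons, List.map_cons]
      rw [ih]
      split <;> simp

lemma pvA_enum_eq_sponge (l : List Char) (n : Nat) :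
    (PySem.List.enumerate l (2 * (n : Int))).map (fun p =>
        if PySem.Int.mod p.1 2 == 0 then PySem.Chars.lowerChar p.2
        else PySem.Chars.upperChar p.2) = pvSponge l := by
  induction l using pvSponge.induct generalizing n with
  | case1 => simp [PySem.List.enumerate_nil, pvSponge]
  | case2 c =>
      have h0 : (2:Int) ∣ 2 * (n : Int) := ⟨n, rfl⟩
      simp [PySem.List.enumerate_cons, PySem.List.enumerate_nil, pvSponge, h0]
  | case3 c d rest ih =>
      have h0 : (2:Int) ∣ 2 * (n : Int) := ⟨n, rfl⟩
      have h1 : ¬ (2:Int) ∣ (2 * (n : Int) + 1) := by omega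
      have h2 : (2 * (n : Int) + 1 + 1) = 2 * ((n + 1 : Nat) : Int) := by push_cast; ring
      simp only [PySem.List.enumerate_cons, List.map_cons, pvSponge]
      rw [h2, ih]
      simp

-- ===== VERDICT (by name: the statement is the Claim_ definition above) =====
theorem to_spongecase_spec : Claim_equal_to_spongecase := by
  intro text _
  unfold Spec_to_spongecase to_spongecase to_spongecase_alt
  apply String.ext
  rw [pvA_foldl_toList]
  have h := pvA_enum_eq_sponge text.toList 0
  simp only [Nat.cast_zero, mul_zero] at h
  rw [h]
  simp only [pvB_eq_sponge]
  simp
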